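-- pv_equiv track=rewrite | github.com/Jin-bao/Project-Euler | Python/P057-平方根逼近.py | squareRootConvergents
-- ===== SOURCE A (Python) =====
-- def squareRootConvergents(num:int) -> dict:
--   numerator = 1
--   denominator = 1
--   srcDict = {}
--   while num > 0:
--     numerator += denominator
--     numerator, denominator = denominator, numerator
--     numerator += denominator
--     srcDict[numerator] = denominator
--     num -= 1
--   return srcDict
-- ===== SOURCE B (Python) =====
-- def squareRootConvergents(num: int) -> dict:
--     # Each convergent is computed independently as the k-th power (1+sqrt(2))**k
--     # in Z[sqrt(2)], via binary exponentiation; dict entry is (real part -> sqrt2 part).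
--     def mul(x, y):
--         a, b = x
--         c, d = y
--         return (a * c + 2 * b * d, a * d + b * c)
--
--     def pw(k):
--         r = (1, 0)
--         base = (1, 1)
--         while k > 0:
--             if k % 2 == 1:
--                 r = mul(r, base)
--             base = mul(base, base)
--             k //= 2
--         return r
--
--     srcDict = {}
--     for k in range(2, num + 2):
--         a, b = pw(k)
--         srcDict[a] = b
--     return srcDict
-- ===== Notes on version B (the rewrite author's own statement) =====
-- stated objective: alternative
-- what changed: Instead of threading one live (numerator, denominator) pair through a sequential add-swap-add loop, B computes each dict entry independently as (1+sqrt(2))**k in Z[sqrt(2)] by binary exponentiation (square-and-multiply), for k = 2..num+1.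
import Mathlib
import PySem

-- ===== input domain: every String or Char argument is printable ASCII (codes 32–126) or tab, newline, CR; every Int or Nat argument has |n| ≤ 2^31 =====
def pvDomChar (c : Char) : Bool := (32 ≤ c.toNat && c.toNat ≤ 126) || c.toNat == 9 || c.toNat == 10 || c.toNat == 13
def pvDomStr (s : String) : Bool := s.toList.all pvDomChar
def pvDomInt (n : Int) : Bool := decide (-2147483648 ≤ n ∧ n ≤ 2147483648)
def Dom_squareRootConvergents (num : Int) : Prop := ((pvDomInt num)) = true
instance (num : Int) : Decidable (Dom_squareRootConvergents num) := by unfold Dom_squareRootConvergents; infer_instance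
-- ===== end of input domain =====

-- B computes each dict entry independently as (1+sqrt(2))^k in Z[sqrt 2] by binary
-- exponentiation, instead of A's sequential add-swap-add loop (objective: alternative).

-- ===== PORT A =====
-- A's while-loop: state (numerator, denominator, srcDict), decrementing num.
def squareRootConvergentsGoA (num numerator denominator : Int)
    (srcDict : PySem.Dict Int Int) : PySem.Dict Int Int :=
  if h : num > 0 then
    -- numerator += denominator; numerator, denominator = denominator, numerator; numerator += denominator
    let n1 := numerator + denominator
    let numerator' := denominator
    let denominator' := n1
    let numerator'' := numerator' + denominator'
    squareRootConvergentsGoA (num - 1) numerator'' denominator'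
      (srcDict.insert numerator'' denominator')
  else srcDict
termination_by num.toNat
decreasing_by omega

def squareRootConvergents (num : Int) : List (Int × Int) :=
  (squareRootConvergentsGoA num 1 1 (PySem.Dict.ofList [])).items

-- ===== PORT B =====
-- Source B's mul: multiplication in Z[sqrt 2] on coefficient pairs.
def pvMulB (x y : Int × Int) : Int × Int :=
  (x.1 * y.1 + 2 * x.2 * y.2, x.1 * y.2 + x.2 * y.1)

-- Source B's pw loop: binary exponentiation, state (r, base, k).
def pvPwGoB (r base : Int × Int) (k : Int) : Int × Int :=
  if _h : k > 0 then
    pvPwGoB (if PySem.Int.mod k 2 = 1 then pvMulB r base else r)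
      (pvMulB base base) (PySem.Int.floordiv k 2)
  else r
termination_by k.toNat
decreasing_by
  have h2 : PySem.Int.floordiv k 2 = k / 2 := PySem.Int.floordiv_eq_ediv_of_pos (by omega)
  omega

def pvPwB (k : Int) : Int × Int := pvPwGoB (1, 0) (1, 1) k

def squareRootConvergents_alt (num : Int) : List (Int × Int) :=
  ((PySem.List.pyRange 2 (num + 2) 1).foldl
    (fun d k => let p := pvPwB k; d.insert p.1 p.2)
    (PySem.Dict.ofList [])).items

-- ===== PRECONDITION & SPEC =====
def Spec_squareRootConvergents (num : Int) (out : List (Int × Int)) : Prop := out = squareRootConvergents_alt num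
instance (num : Int) (out : List (Int × Int)) : Decidable (Spec_squareRootConvergents num out) := by unfold Spec_squareRootConvergents; infer_instance

-- ===== CLAIM (what is proved, stated in full; the proofs are below) =====
def Claim_equal_squareRootConvergents : Prop := ∀ (num : Int), Dom_squareRootConvergents num → Spec_squareRootConvergents num (squareRootConvergents num)

-- ===== LEMMAS AND PROOFS =====

-- naive powers of (1,1) = 1 + sqrt 2 in Z[sqrt 2]
def pvC : Nat → Int × Int
  | 0 => (1, 0)
  | Nat.succ k => pvMulB (pvC k) (1, 1)

theorem pvMulB_one (x : Int × Int) : pvMulB x (1, 0) = x := by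
  cases x; simp [pvMulB]

theorem pvMulB_comm (x y : Int × Int) : pvMulB x y = pvMulB y x := by
  cases x; cases y; simp [pvMulB]; constructor <;> ring

theorem pvMulB_assoc (x y z : Int × Int) :
    pvMulB (pvMulB x y) z = pvMulB x (pvMulB y z) := by
  cases x; cases y; cases z; simp [pvMulB]; constructor <;> ring

-- general naive power
def pvNpow (b : Int × Int) : Nat → Int × Int
  | 0 => (1, 0)
  | Nat.succ k => pvMulB (pvNpow b k) b

theorem pvNpow_sq (b : Int × Int) (n : Nat) :
    pvNpow (pvMulB b b) n = pvNpow b (2 * n) := by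
  induction n with
  | zero => rfl
  | succ n ih =>
    have h : 2 * (n + 1) = (2 * n).succ.succ := by omega
    rw [h]
    show pvMulB (pvNpow (pvMulB b b) n) (pvMulB b b)
        = pvMulB (pvMulB (pvNpow b (2 * n)) b) b
    rw [ih, pvMulB_assoc]

-- binary exponentiation invariant
theorem pvPwGoB_eq (n : Nat) : ∀ (k : Int), k.toNat = n → ∀ r b,
    pvPwGoB r b k = pvMulB r (pvNpow b k.toNat) := by
  induction n using Nat.strong_induction_on with
  | _ n ih =>
    intro k hk r b
    by_cases hpos : k > 0
    · rw [pvPwGoB, dif_pos hpos]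
      have hfd : PySem.Int.floordiv k 2 = k / 2 := PySem.Int.floordiv_eq_ediv_of_pos (by omega)
      have hmd : PySem.Int.mod k 2 = k % 2 := PySem.Int.mod_eq_emod_of_pos (by omega)
      have hlt : (k / 2).toNat < n := by omega
      have hrec := ih _ hlt (k / 2) rfl
      have hsplit : k = 2 * (k / 2) + k % 2 := by omega
      have htn : k.toNat = 2 * (k / 2).toNat + (k % 2).toNat := by omega
      by_cases hodd : k % 2 = 1
      · rw [hmd, if_pos hodd, hfd]
        rw [hrec (pvMulB r b) (pvMulB b b), pvNpow_sq]
        have : k.toNat = (2 * (k / 2).toNat).succ := by omega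
        rw [this]
        show pvMulB (pvMulB r b) (pvNpow b (2 * (k / 2).toNat))
            = pvMulB r (pvMulB (pvNpow b (2 * (k / 2).toNat)) b)
        rw [pvMulB_assoc, pvMulB_comm b (pvNpow b _)]
      · have hz : k % 2 = 0 := by omega
        rw [hmd, if_neg (by omega), hfd]
        rw [hrec r (pvMulB b b), pvNpow_sq]
        have : k.toNat = 2 * (k / 2).toNat := by omega
        rw [this]
    · rw [pvPwGoB, dif_neg hpos]
      have : k.toNat = 0 := by omega
      rw [this]
      exact (pvMulB_one r).symm

theorem pvMulB_one_left (x : Int × Int) : pvMulB (1, 0) x = x := by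
  rw [pvMulB_comm]; exact pvMulB_one x

theorem pvNpow_eq_pvC (n : Nat) : pvNpow (1, 1) n = pvC n := by
  induction n with
  | zero => rfl
  | succ n ih => show pvMulB (pvNpow (1,1) n) (1,1) = pvMulB (pvC n) (1,1); rw [ih]

theorem pvPwB_eq (k : Int) : pvPwB k = pvC k.toNat := by
  rw [pvPwB, pvPwGoB_eq k.toNat k rfl, pvMulB_one_left, pvNpow_eq_pvC]

-- A's loop, relative to the power index: state after starting at power j+1
theorem squareRootConvergentsGoA_eq (m : Nat) : ∀ (j : Nat) (d : PySem.Dict Int Int),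
    squareRootConvergentsGoA (m : Int) (pvC (j + 1)).1 (pvC (j + 1)).2 d
      = (List.range m).foldl
          (fun d i => d.insert (pvC (i + j + 2)).1 (pvC (i + j + 2)).2) d := by
  induction m with
  | zero =>
    intro j d
    rw [squareRootConvergentsGoA, dif_neg (by omega)]
    rfl
  | succ m ih =>
    intro j d
    rw [squareRootConvergentsGoA, dif_pos (by exact_mod_cast Nat.succ_pos m)]
    have hstep2 : (pvC (j + 1)).1 + (pvC (j + 1)).2 = (pvC (j + 2)).2 := by
      simp only [pvC, pvMulB]; ring
    have hstep1 : (pvC (j + 1)).2 + (pvC (j + 2)).2 = (pvC (j + 2)).1 := by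
      simp only [pvC, pvMulB]; ring
    have hm : ((m + 1 : Nat) : Int) - 1 = (m : Int) := by push_cast; ring
    simp only [hstep2, hstep1, hm]
    rw [ih (j + 1)]
    rw [List.range_succ_eq_map, List.foldl_cons, List.foldl_map]
    have h0 : (pvC (0 + j + 2)).1 = (pvC (j + 2)).1 := by norm_num
    have h0' : (pvC (0 + j + 2)).2 = (pvC (j + 2)).2 := by norm_num
    rw [h0, h0']
    apply PySem.List.foldl_congr_mem
    intro d' i _
    have : i + 1 + j + 2 = i + (j + 1) + 2 := by omega
    rw [this]

-- ===== VERDICT (by name: the statement is the Claim_ definition above) =====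
theorem squareRootConvergents_spec : Claim_equal_squareRootConvergents := by
  intro num _
  unfold Spec_squareRootConvergents squareRootConvergents squareRootConvergents_alt
  rw [PySem.List.pyRange_one]
  have hlen : (num + 2 - 2).toNat = num.toNat := by omega
  rw [hlen]
  have hA := squareRootConvergentsGoA_eq num.toNat 0 (PySem.Dict.ofList [])
  by_cases h : num ≤ 0
  · have h0 : num.toNat = 0 := by omega
    rw [h0] at hA ⊢
    rw [squareRootConvergentsGoA, dif_neg (by omega)]
    rfl
  · have hc : ((num.toNat : Nat) : Int) = num := by omega
    rw [hc] at hA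
    have hA' : squareRootConvergentsGoA num 1 1 (PySem.Dict.ofList []) =
        (List.range num.toNat).foldl
          (fun d i => d.insert (pvC (i + 0 + 2)).1 (pvC (i + 0 + 2)).2)
          (PySem.Dict.ofList []) := by
      simpa [pvC, pvMulB] using hA
    rw [hA', List.foldl_map]
    apply congrArg PySem.Dict.items
    apply PySem.List.foldl_congr_mem
    intro d' k _
    show d'.insert (pvC (k + 0 + 2)).1 (pvC (k + 0 + 2)).2
        = (let p := pvPwB (2 + (k : Int)); d'.insert p.1 p.2)
    simp only [pvPwB_eq]
    have : ((2 + (k : Int)).toNat) = k + 0 + 2 := by omega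
    rw [this]
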